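-- pv_equiv track=rewrite | github.com/rfportilla/TowerOfHanoi | towers.py | _iter_ring_number
-- ===== SOURCE A (Python) =====
-- def _iter_ring_number(step):
--     if step < 1:
--         return 0
--     ring = 1
--     while(not (step & 1)):
--         ring += 1
--         step = step >> 1
--     return ring
-- ===== SOURCE B (Python) =====
-- def _iter_ring_number(step):
--     if step < 1:
--         return 0
--     return (step & -step).bit_length()
-- ===== Notes on version B (the rewrite author's own statement) =====
-- stated objective: idiomatic
-- what changed: Replaced the shift-and-count while loop with the closed-form bit expression (step & -step).bit_length(), which isolates the lowest set bit and reads off its position directly.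
import Mathlib
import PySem

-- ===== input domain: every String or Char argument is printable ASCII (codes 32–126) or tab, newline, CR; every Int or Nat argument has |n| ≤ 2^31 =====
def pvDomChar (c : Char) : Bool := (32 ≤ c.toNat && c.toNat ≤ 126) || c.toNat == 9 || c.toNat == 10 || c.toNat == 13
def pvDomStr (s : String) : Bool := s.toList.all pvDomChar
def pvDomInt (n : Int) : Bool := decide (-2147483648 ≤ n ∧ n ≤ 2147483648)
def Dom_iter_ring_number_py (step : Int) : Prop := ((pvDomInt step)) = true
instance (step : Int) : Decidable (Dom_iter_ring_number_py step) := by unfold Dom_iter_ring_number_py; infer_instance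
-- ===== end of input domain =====

-- B replaces A's shift-and-count while loop by the closed-form (step & -step).bit_length(); objective: idiomatic/closed form.

-- ===== PORT A =====
-- the while loop: `while not (step & 1): ring += 1; step = step >> 1`; the loop is only
-- entered with step ≥ 1, so the state is kept as a Nat (s % 2 = 1 ↔ s & 1 for Nat).
-- The `s = 0` branch is a totality guard only: it is unreachable from iter_ring_number_py
-- (there s starts ≥ 1 and, being even in the recursive branch, stays ≥ 1 after halving).
def iterLoopA (s : Nat) (ring : Int) : Int :=
  if s % 2 = 1 then ring
  else if h : s = 0 then ring
  else iterLoopA (s / 2) (ring + 1)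
termination_by s
decreasing_by exact Nat.div_lt_self (Nat.pos_of_ne_zero h) one_lt_two

def iter_ring_number_py (step : Int) : Int :=
  if step < 1 then 0
  else iterLoopA step.toNat 1

-- ===== PORT B =====
-- Source B: `return (step & -step).bit_length()`; Int.land is Python's `&` (two's complement),
-- and Nat.size is Python's int.bit_length on the nonnegative result.
def iter_ring_number_py_alt (step : Int) : Int :=
  if step < 1 then 0
  else ((Int.land step (-step)).toNat.size : Int)

-- ===== PRECONDITION & SPEC =====
def Spec_iter_ring_number_py (step : Int) (out : Int) : Prop := out = iter_ring_number_py_alt step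
instance (step : Int) (out : Int) : Decidable (Spec_iter_ring_number_py step out) := by unfold Spec_iter_ring_number_py; infer_instance

-- ===== CLAIM (what is proved, stated in full; the proofs are below) =====
def Claim_equal_iter_ring_number_py : Prop := ∀ (step : Int), Dom_iter_ring_number_py step → Spec_iter_ring_number_py step (iter_ring_number_py step)

-- ===== LEMMAS AND PROOFS =====

-- Python `step & -step` for positive step = the lowest set bit, as the Nat `n &~ (n-1)`.
theorem land_neg_eq_ldiff (k : Nat) :
    (Int.land (Int.ofNat (k+1)) (-(Int.ofNat (k+1)))).toNat = Nat.ldiff (k+1) k := by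
  have h : -(Int.ofNat (k+1)) = Int.negSucc k := rfl
  rw [h]; simp [Int.land]

theorem ldiff_pred_odd (n : Nat) (h : n % 2 = 1) : Nat.ldiff n (n-1) = 1 := by
  apply Nat.eq_of_testBit_eq
  intro i
  cases i with
  | zero =>
      rw [Nat.testBit_ldiff]
      simp only [Nat.testBit_zero]
      have h1 : (n-1) % 2 = 0 := by omega
      simp [h, h1]
  | succ i =>
      rw [Nat.testBit_ldiff, Nat.testBit_succ, Nat.testBit_succ]
      have : (n-1)/2 = n/2 := by omega
      rw [this]
      simp [Nat.testBit_succ]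

theorem ldiff_pred_even (m : Nat) (hm : 0 < m) :
    Nat.ldiff (2*m) (2*m-1) = 2 * Nat.ldiff m (m-1) := by
  apply Nat.eq_of_testBit_eq
  intro i
  cases i with
  | zero =>
      rw [Nat.testBit_ldiff]
      simp only [Nat.testBit_zero]
      have h1 : (2*m) % 2 = 0 := by omega
      have h2 : (2 * Nat.ldiff m (m-1)) % 2 = 0 := by omega
      simp [h1, h2]
  | succ i =>
      rw [Nat.testBit_ldiff, Nat.testBit_succ, Nat.testBit_succ, Nat.testBit_succ]
      have h1 : (2*m)/2 = m := by omega
      have h2 : (2*m-1)/2 = m-1 := by omega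
      have h3 : (2 * Nat.ldiff m (m-1))/2 = Nat.ldiff m (m-1) := by omega
      rw [h1, h2, h3, Nat.testBit_ldiff]

theorem ldiff_pred_pos (n : Nat) (hn : 0 < n) : 0 < Nat.ldiff n (n-1) := by
  induction n using Nat.strong_induction_on with
  | _ n ih =>
    rcases Nat.even_or_odd n with he | ho
    · obtain ⟨m, hm⟩ := he
      have hm' : 0 < m := by omega
      have : n = 2 * m := by omega
      subst this
      rw [ldiff_pred_even m hm']
      have := ih m (by omega) hm'
      omega
    · rw [ldiff_pred_odd n (Nat.odd_iff.mp ho)]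
      omega

theorem size_two_mul (x : Nat) (hx : 0 < x) : Nat.size (2*x) = Nat.size x + 1 := by
  have := Nat.size_bit (b := false) (n := x) (by simp [Nat.bit]; omega)
  simpa [Nat.bit, two_mul] using this

theorem iterLoopA_eq (n : Nat) (hn : 0 < n) :
    ∀ r : Int, iterLoopA n r = r - 1 + ((Nat.ldiff n (n-1)).size : Int) := by
  induction n using Nat.strong_induction_on with
  | _ n ih =>
    intro r
    rcases Nat.even_or_odd n with he | ho
    · obtain ⟨m, hm⟩ := he
      have hm' : 0 < m := by omega
      have hn2 : n = 2 * m := by omega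
      subst hn2
      rw [iterLoopA]
      have h1 : ¬ ((2*m) % 2 = 1) := by omega
      have h2 : ¬ (2*m = 0) := by omega
      simp only [h1, if_false, h2, dite_false]
      have h3 : (2*m)/2 = m := by omega
      rw [h3, ih m (by omega) hm' (r+1), ldiff_pred_even m hm',
          size_two_mul _ (ldiff_pred_pos m hm')]
      push_cast
      ring
    · have ho' : n % 2 = 1 := Nat.odd_iff.mp ho
      rw [iterLoopA]
      simp only [ho', if_true]
      rw [ldiff_pred_odd n ho']
      simp [Nat.size]

-- ===== VERDICT (by name: the statement is the Claim_ definition above) =====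
theorem iter_ring_number_py_spec : Claim_equal_iter_ring_number_py := by
  intro step _
  unfold Spec_iter_ring_number_py iter_ring_number_py iter_ring_number_py_alt
  by_cases h : step < 1
  · simp [h]
  · simp only [h, if_false]
    have h1 : 1 ≤ step := by omega
    obtain ⟨k, hk⟩ : ∃ k, step.toNat = k + 1 := ⟨step.toNat - 1, by omega⟩
    have hs : step = Int.ofNat (k+1) := by
      have h2 := Int.toNat_of_nonneg (a := step) (by omega)
      rw [hk] at h2
      exact h2.symm
    rw [hk, hs, land_neg_eq_ldiff k, iterLoopA_eq (k+1) (by omega) 1]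
    simp
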